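-- pv_equiv track=rewrite | github.com/ImoutoHeaven/scripts-examples | rclone_batch_transfer/rclone-group.py | group_by_part_size
-- ===== SOURCE A (Python) =====
-- from typing import List, Dict, Tuple, Set, Optional
--
-- def group_by_part_size(items: Dict[str, int], part_size: int) -> List[List[Tuple[str, int]]]:
--     """将项目分组，使每组的总大小最接近指定的部分大小"""
--     # 按大小对项目进行排序(从大到小)
--     sorted_items = sorted(items.items(), key=lambda x: x[1], reverse=True)
--
--     # 使用贪心算法进行分箱打包
--     parts = []
--     remaining_items = list(sorted_items)
--
--     # 处理太大的单个项目
--     large_items = [item for item in remaining_items if item[1] > part_size]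
--     for item in large_items:
--         parts.append([item])
--         remaining_items.remove(item)
--
--     # 尝试找到最佳组合以接近part_size
--     while remaining_items:
--         best_combo = find_best_combination(remaining_items, part_size)
--         if not best_combo:
--             # 如果找不到组合，就把剩下的项目都放在最后一个部分
--             parts.append(remaining_items)
--             break
--
--         parts.append(best_combo)
--         for item in best_combo:
--             remaining_items.remove(item)
--
--     return parts
--
-- def find_best_combination(items: List[Tuple[str, int]], target_size: int) -> List[Tuple[str, int]]:
--     """找到总和最接近但不超过目标大小的项目组合"""
--     if not items:
--         return []
--
--     # 如果只有一个项目，且它小于目标大小，则返回它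
--     if len(items) == 1 and items[0][1] <= target_size:
--         return [items[0]]
--
--     # 尝试从剩余项目中找到最佳组合
--     best_combo = []
--     best_size = 0
--
--     # 尝试将第一个项目与其他项目组合
--     first_item = items[0]
--     if first_item[1] <= target_size:
--         best_combo = [first_item]
--         best_size = first_item[1]
--
--     # 尝试其他组合
--     for i in range(1, len(items) + 1):
--         for j in range(i + 1, len(items) + 1):
--             combo = items[i-1:j]
--             combo_size = sum(item[1] for item in combo)
--
--             if combo_size <= target_size and combo_size > best_size:
--                 best_combo = combo
--                 best_size = combo_size
--
--     return best_combo
-- ===== SOURCE B (Python) =====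
-- def _best_span(rest, target):
--     """Best contiguous span: index pair (i, j) whose slice sums closest to
--     target without exceeding it (singleton candidates: only the first item,
--     matching the task's rule); None when no candidate qualifies."""
--     n = len(rest)
--     pre = [0]
--     for _, size in rest:
--         pre.append(pre[-1] + size)
--     best = None
--     best_size = 0
--     if n and rest[0][1] <= target:
--         best, best_size = (0, 1), rest[0][1]
--     for i in range(n):
--         for j in range(i + 2, n + 1):
--             s = pre[j] - pre[i]
--             if s <= target and best_size < s:
--                 best, best_size = (i, j), s
--     return best
--
-- def group_by_part_size(items, part_size):
--     order = sorted(items.items(), key=lambda x: x[1], reverse=True)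
--     parts = [[it] for it in order if it[1] > part_size]
--     rest = [it for it in order if it[1] <= part_size]
--     while rest:
--         span = _best_span(rest, part_size)
--         if span is None:
--             parts.append(rest)
--             break
--         i, j = span
--         parts.append(rest[i:j])
--         rest = rest[:i] + rest[j:]
--     return parts
-- ===== Notes on version B (the rewrite author's own statement) =====
-- stated objective: faster
-- what changed: Per packing round, B builds a prefix-sum array once and scans index pairs (O(n^2) per round) instead of A's materialising and re-summing every contiguous slice (O(n^3) per round), splits large/small items by two filters instead of list.remove per item, and deletes the chosen combo by slicing rest[:i]+rest[j:] instead of element-by-element remove.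
import Mathlib
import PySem

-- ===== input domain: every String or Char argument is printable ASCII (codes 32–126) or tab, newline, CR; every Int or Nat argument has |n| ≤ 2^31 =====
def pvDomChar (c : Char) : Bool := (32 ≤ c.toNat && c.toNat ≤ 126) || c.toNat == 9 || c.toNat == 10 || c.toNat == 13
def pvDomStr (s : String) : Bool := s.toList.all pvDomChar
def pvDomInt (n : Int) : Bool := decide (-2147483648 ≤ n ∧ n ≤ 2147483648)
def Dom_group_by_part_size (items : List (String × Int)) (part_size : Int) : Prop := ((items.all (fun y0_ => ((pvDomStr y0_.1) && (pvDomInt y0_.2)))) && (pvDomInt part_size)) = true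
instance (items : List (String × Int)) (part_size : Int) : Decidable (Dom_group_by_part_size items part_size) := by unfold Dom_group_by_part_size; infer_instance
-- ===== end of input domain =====

-- B replaces A's per-slice re-summation (O(n^3) per round) by a prefix-sum array with an
-- index-pair scan (O(n^2) per round) and removes the chosen combo by slicing instead of
-- element-by-element list.remove; a timing run measures the speed-up.

-- ===== PORT A =====

-- python: remaining_items.remove(item) — exact here: at every call site the removed
-- element is a member, so remove? never returns none and the getD default is unreachable.
def pvRemove (r : List (String × Int)) (x : String × Int) : List (String × Int) :=
  (PySem.List.remove? r x).getD r

def find_best_combination (items : List (String × Int)) (target_size : Int) : List (String × Int) :=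
  match items with
  | [] => []                                       -- if not items: return []
  | first :: _ =>                                  -- first = items[0]
    if items.length = 1 ∧ first.2 ≤ target_size then [first]
    else
      let init : List (String × Int) × Int :=
        if first.2 ≤ target_size then ([first], first.2) else ([], 0)
      let r := (PySem.List.pyRange 1 ((items.length : Int) + 1) 1).foldl (fun st i =>
          (PySem.List.pyRange (i + 1) ((items.length : Int) + 1) 1).foldl (fun st j =>
            let combo := PySem.List.slice items (some (i - 1)) (some j)
            let combo_size := combo.foldl (fun a x => a + x.2) 0
            if combo_size ≤ target_size ∧ st.2 < combo_size then (combo, combo_size) else st) st) init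
      r.1

-- the while-loop; fuel = remaining.length + 1 is always sufficient: each iteration either
-- breaks or removes a nonempty slice's worth of elements, shrinking remaining by ≥ 1.
def groupLoopA (fuel : Nat) (parts : List (List (String × Int)))
    (remaining : List (String × Int)) (part_size : Int) : List (List (String × Int)) :=
  match fuel with
  | 0 => parts
  | fuel + 1 =>
    if remaining.isEmpty then parts
    else
      let best := find_best_combination remaining part_size
      if best.isEmpty then parts ++ [remaining]
      else groupLoopA fuel (parts ++ [best]) (best.foldl pvRemove remaining) part_size

def group_by_part_size (items : List (String × Int)) (part_size : Int) : List (List (String × Int)) :=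
  let sorted_items := PySem.List.sorted items (fun x => x.2) true
  let large := sorted_items.filter (fun it => decide (part_size < it.2))
  let st := large.foldl
      (fun (st : List (List (String × Int)) × List (String × Int)) it =>
        (st.1 ++ [[it]], pvRemove st.2 it)) ([], sorted_items)
    -- for item in large_items: parts.append([item]); remaining_items.remove(item)
  groupLoopA (st.2.length + 1) st.1 st.2 part_size

-- ===== PORT B =====

def bestSpan (rest : List (String × Int)) (target : Int) : Option (Int × Int) :=
  let n : Int := rest.length
  let pre : List Int := rest.foldl (fun p x => p ++ [PySem.List.pyGetD p (-1) 0 + x.2]) [0]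
  let init : Option (Int × Int) × Int :=
    if rest.length ≠ 0 ∧ (PySem.List.pyGetD rest 0 ("", 0)).2 ≤ target
    then (some (0, 1), (PySem.List.pyGetD rest 0 ("", 0)).2) else (none, 0)
  let r := (PySem.List.pyRange 0 n 1).foldl (fun st i =>
      (PySem.List.pyRange (i + 2) (n + 1) 1).foldl (fun st j =>
        let s := PySem.List.pyGetD pre j 0 - PySem.List.pyGetD pre i 0
        if s ≤ target ∧ st.2 < s then (some (i, j), s) else st) st) init
  r.1

def groupLoopB (fuel : Nat) (parts : List (List (String × Int)))
    (rest : List (String × Int)) (part_size : Int) : List (List (String × Int)) :=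
  match fuel with
  | 0 => parts
  | fuel + 1 =>
    if rest.isEmpty then parts
    else
      match bestSpan rest part_size with
      | none => parts ++ [rest]
      | some (i, j) =>
        groupLoopB fuel (parts ++ [PySem.List.slice rest (some i) (some j)])
          (PySem.List.slice rest none (some i) ++ PySem.List.slice rest (some j) none) part_size

def group_by_part_size_alt (items : List (String × Int)) (part_size : Int) : List (List (String × Int)) :=
  let order := PySem.List.sorted items (fun x => x.2) true
  let parts := (order.filter (fun it => decide (part_size < it.2))).map (fun it => [it])
  let rest := order.filter (fun it => decide (it.2 ≤ part_size))
  groupLoopB (rest.length + 1) parts rest part_size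

-- ===== PRECONDITION & SPEC =====
-- Pre_ excludes association lists with duplicate keys: the Python function's argument is a
-- dict, which cannot hold two entries with the same key.
def Pre_group_by_part_size (items : List (String × Int)) (part_size : Int) : Prop :=
  (items.map Prod.fst).Nodup
instance (items : List (String × Int)) (part_size : Int) : Decidable (Pre_group_by_part_size items part_size) := by unfold Pre_group_by_part_size; infer_instance
def pvWitness_group_by_part_size : (List (String × Int)) × Int := ([("a", 5), ("b", 3), ("c", 2)], 6)

def Spec_group_by_part_size (items : List (String × Int)) (part_size : Int) (out : List (List (String × Int))) : Prop := out = group_by_part_size_alt items part_size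
instance (items : List (String × Int)) (part_size : Int) (out : List (List (String × Int))) : Decidable (Spec_group_by_part_size items part_size out) := by unfold Spec_group_by_part_size; infer_instance

-- ===== CLAIM (what is proved, stated in full; the proofs are below) =====
def Claim_equal_group_by_part_size : Prop := ∀ (items : List (String × Int)) (part_size : Int), Dom_group_by_part_size items part_size → Pre_group_by_part_size items part_size → Spec_group_by_part_size items part_size (group_by_part_size items part_size)

-- ===== LEMMAS AND PROOFS =====

def sumSz (l : List (String × Int)) : Int := (l.map (·.2)).sum
def scanSums : List (String × Int) → Int → List Int
  | [], c => [c]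
  | x :: xs, c => c :: scanSums xs (c + x.2)

theorem foldl_rel {α β γ : Type} (R : β → γ → Prop) (f : β → α → β) (g : γ → α → γ) :
    ∀ (l : List α), (∀ a ∈ l, ∀ b c, R b c → R (f b a) (g c a)) →
      ∀ b c, R b c → R (l.foldl f b) (l.foldl g c) := by
  intro l
  induction l with
  | nil => intro _ b c h; exact h
  | cons x xs ih =>
    intro hstep b c h
    exact ih (fun a ha => hstep a (List.mem_cons_of_mem _ ha)) _ _ (hstep x (List.mem_cons_self) _ _ h)

theorem pre_eq (l : List (String × Int)) : ∀ (q : List Int) (c : Int),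
    l.foldl (fun p x => p ++ [PySem.List.pyGetD p (-1) 0 + x.2]) (q ++ [c]) = q ++ scanSums l c := by
  induction l with
  | nil => intro q c; simp [scanSums]
  | cons x xs ih =>
    intro q c
    simp only [List.foldl_cons, PySem.List.pyGetD_neg_one_append_singleton, scanSums]
    rw [List.append_assoc q [c]]
    have := ih (q ++ [c]) (c + x.2)
    simpa using this

theorem scan_getD (l : List (String × Int)) : ∀ (k : Nat) (c : Int), k ≤ l.length →
    (scanSums l c).getD k 0 = c + sumSz (l.take k) := by
  induction l with
  | nil => intro k c hk; have : k = 0 := Nat.le_zero.mp hk; subst this; simp [scanSums, sumSz]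
  | cons x xs ih =>
    intro k c hk
    cases k with
    | zero => simp [scanSums, sumSz]
    | succ k =>
      simp only [scanSums, List.getD_cons_succ, List.take_succ_cons]
      rw [ih k (c + x.2) (by simpa using hk)]
      simp [sumSz]; ring

theorem sum_take_add (l : List (String × Int)) (a k : Nat) :
    sumSz (l.take (a + k)) = sumSz (l.take a) + sumSz ((l.drop a).take k) := by
  rw [List.take_add]
  simp [sumSz]
theorem foldl_remove_cons {α : Type} [BEq α] [LawfulBEq α] :
    ∀ (m : List α) (l : List α) (x : α), x ∉ m →
      m.foldl (fun r y => (PySem.List.remove? r y).getD r) (x :: l)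
        = x :: m.foldl (fun r y => (PySem.List.remove? r y).getD r) l := by
  intro m
  induction m with
  | nil => intro l x _; rfl
  | cons y ys ih =>
    intro l x hx
    have hxy : x ≠ y := fun h => hx (h ▸ List.mem_cons_self)
    simp only [List.foldl_cons]
    rw [PySem.List.remove?_cons_of_ne l hxy]
    cases h : PySem.List.remove? l y with
    | none => simp only [Option.map_none, Option.getD_none]
              exact ih l x (fun hm => hx (List.mem_cons_of_mem _ hm))
    | some e => simp only [Option.map_some, Option.getD_some]
                exact ih e x (fun hm => hx (List.mem_cons_of_mem _ hm))

theorem foldl_remove_middle {α : Type} [BEq α] [LawfulBEq α] :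
    ∀ (mid pre suf : List α), (pre ++ (mid ++ suf)).Nodup →
      mid.foldl (fun r y => (PySem.List.remove? r y).getD r) (pre ++ (mid ++ suf)) = pre ++ suf := by
  intro mid
  induction mid with
  | nil => intro pre suf _; rfl
  | cons x m ih =>
    intro pre suf hnd
    have hxmem : x ∈ pre ++ (x :: m ++ suf) := by simp
    have hxpre : x ∉ pre := by
      have hdisj := (List.nodup_append.mp hnd).2.2
      intro hx
      exact hdisj x hx x (by simp) rfl
    simp only [List.foldl_cons]
    rw [PySem.List.remove?_eq_some_erase _ x hxmem, Option.getD_some,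
        List.erase_append_right _ hxpre, List.cons_append, List.erase_cons_head]
    exact ih pre suf (by
      rw [List.nodup_append] at hnd ⊢
      obtain ⟨h1, h2, h3⟩ := hnd
      exact ⟨h1, (List.nodup_cons.mp (by simpa using h2)).2,
        fun a ha b hb => h3 a ha b (by simp at hb ⊢; tauto)⟩)
theorem remove_slice (l : List (String × Int)) (i j : Int) (hn : l.Nodup)
    (h0 : 0 ≤ i) (hij : i < j) (hj : j ≤ (l.length : Int)) :
    (PySem.List.slice l (some i) (some j)).foldl pvRemove l
      = PySem.List.slice l none (some i) ++ PySem.List.slice l (some j) none := by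
  have h0j : 0 ≤ j := le_of_lt (lt_of_le_of_lt h0 hij)
  rw [PySem.List.slice_toNat l h0 h0j, PySem.List.slice_to l h0, PySem.List.slice_from l h0j]
  set a := i.toNat with ha
  set b := j.toNat with hb
  have hab : a ≤ b := Int.toNat_le_toNat (le_of_lt hij)
  have hdecomp : l = l.take a ++ (List.take (b - a) (l.drop a) ++ l.drop b) := by
    have h1 : l.drop b = (l.drop a).drop (b - a) := by
      rw [List.drop_drop]; congr 1; omega
    rw [h1, List.take_append_drop, List.take_append_drop]
  have hfun : ∀ (r : List (String × Int)) (y : String × Int),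
      pvRemove r y = (PySem.List.remove? r y).getD r := fun _ _ => rfl
  calc (List.take (b - a) (l.drop a)).foldl pvRemove l
      = (List.take (b - a) (l.drop a)).foldl (fun r y => (PySem.List.remove? r y).getD r)
          (l.take a ++ (List.take (b - a) (l.drop a) ++ l.drop b)) := by
        rw [← hdecomp]; rfl
    _ = l.take a ++ l.drop b := foldl_remove_middle _ _ _ (hdecomp ▸ hn)

theorem remove_filter (p : (String × Int) → Bool) :
    ∀ (l : List (String × Int)), l.Nodup →
      (l.filter p).foldl pvRemove l = l.filter (fun y => !p y) := by
  intro l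
  induction l with
  | nil => intro _; rfl
  | cons x xs ih =>
    intro hnd
    have hx : x ∉ xs := (List.nodup_cons.mp hnd).1
    have hxs : xs.Nodup := (List.nodup_cons.mp hnd).2
    by_cases hp : p x
    · simp only [List.filter_cons, hp, if_pos, List.foldl_cons]
      have : pvRemove (x :: xs) x = xs := by
        simp [pvRemove, PySem.List.remove?_cons_self]
      rw [this, ih hxs]
      simp [hp]
    · have hpx : (!p x) = true := by simp [hp]
      have e1 : (x :: xs).filter p = xs.filter p := by simp [List.filter_cons, hp]
      have e2 : (x :: xs).filter (fun y => !p y) = x :: xs.filter (fun y => !p y) := by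
        simp [List.filter_cons, hp]
      rw [e1, e2]
      have hxnot : x ∉ xs.filter p := fun h => hx (List.mem_of_mem_filter h)
      have h1 := foldl_remove_cons (xs.filter p) xs x hxnot
      have h2 : (xs.filter p).foldl pvRemove (x :: xs) = x :: (xs.filter p).foldl pvRemove xs := h1
      rw [h2, ih hxs]
def spanTo (l : List (String × Int)) : Option (Int × Int) → List (String × Int)
  | none => []
  | some (i, j) => PySem.List.slice l (some i) (some j)

def spanOK (n : Int) : Option (Int × Int) → Prop
  | none => True
  | some (i, j) => 0 ≤ i ∧ i < j ∧ j ≤ n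

def RelBC (l : List (String × Int)) (a : List (String × Int) × Int)
    (b : Option (Int × Int) × Int) : Prop :=
  a.1 = spanTo l b.1 ∧ a.2 = b.2 ∧ spanOK (l.length : Int) b.1

-- B's prefix-sum list is scanSums l 0
theorem pre_scan (l : List (String × Int)) :
    l.foldl (fun p x => p ++ [PySem.List.pyGetD p (-1) 0 + x.2]) [0] = scanSums l 0 := by
  have h := pre_eq l [] 0
  simpa using h

-- pre-lookup at a nonneg in-range Int index is a prefix sum
theorem pre_get (l : List (String × Int)) (j : Int) (h0 : 0 ≤ j) (hj : j ≤ (l.length : Int)) :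
    PySem.List.pyGetD (scanSums l 0) j 0 = sumSz (l.take j.toNat) := by
  have hcast : j = ((j.toNat : Nat) : Int) := (Int.toNat_of_nonneg h0).symm
  conv_lhs => rw [hcast, PySem.List.pyGetD_natCast]
  rw [scan_getD l j.toNat 0 (by omega)]
  ring

-- A's slice sum equals the prefix-sum difference
theorem slice_sum (l : List (String × Int)) (i j : Int) (h0 : 0 ≤ i) (hij : i ≤ j)
    (hj : j ≤ (l.length : Int)) :
    (PySem.List.slice l (some i) (some j)).foldl (fun a x => a + x.2) 0
      = sumSz (l.take j.toNat) - sumSz (l.take i.toNat) := by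
  rw [PySem.List.slice_toNat l h0 (le_trans h0 hij), PySem.List.foldl_add]
  have : j.toNat = i.toNat + (j.toNat - i.toNat) := by omega
  rw [this, sum_take_add]
  simp [sumSz]
-- the two inner loop bodies, named to keep statements readable (proof-side only)
def stepA (l : List (String × Int)) (t : Int) (st : List (String × Int) × Int) (i j : Int) :
    List (String × Int) × Int :=
  let combo := PySem.List.slice l (some (i - 1)) (some j)
  let combo_size := combo.foldl (fun a x => a + x.2) 0
  if combo_size ≤ t ∧ st.2 < combo_size then (combo, combo_size) else st

def stepB (l : List (String × Int)) (t : Int) (st : Option (Int × Int) × Int) (i j : Int) :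
    Option (Int × Int) × Int :=
  let s := PySem.List.pyGetD (scanSums l 0) j 0 - PySem.List.pyGetD (scanSums l 0) i 0
  if s ≤ t ∧ st.2 < s then (some (i, j), s) else st

def outerA (l : List (String × Int)) (t : Int) (init : List (String × Int) × Int) :
    List (String × Int) × Int :=
  (PySem.List.pyRange 1 ((l.length : Int) + 1) 1).foldl (fun st i =>
    (PySem.List.pyRange (i + 1) ((l.length : Int) + 1) 1).foldl
      (fun st j => stepA l t st i j) st) init

def outerB (l : List (String × Int)) (t : Int) (init : Option (Int × Int) × Int) :
    Option (Int × Int) × Int :=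
  (PySem.List.pyRange 0 (l.length : Int) 1).foldl (fun st i =>
    (PySem.List.pyRange (i + 2) ((l.length : Int) + 1) 1).foldl
      (fun st j => stepB l t st i j) st) init

theorem hA_unfold (first : String × Int) (tl : List (String × Int)) (t : Int) :
    find_best_combination (first :: tl) t =
      if (first :: tl).length = 1 ∧ first.2 ≤ t then [first]
      else (outerA (first :: tl) t
        (if first.2 ≤ t then ([first], first.2) else ([], 0))).1 := rfl

theorem hB_unfold (first : String × Int) (tl : List (String × Int)) (t : Int) :
    bestSpan (first :: tl) t =
      (outerB (first :: tl) t
        (if first.2 ≤ t then (some (0, 1), first.2) else (none, 0))).1 := by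
  have hpre := pre_scan (first :: tl)
  have hinit : (if (first :: tl).length ≠ 0 ∧ (PySem.List.pyGetD (first :: tl) 0 ("", 0)).2 ≤ t
      then (some ((0 : Int), (1 : Int)), (PySem.List.pyGetD (first :: tl) 0 ("", 0)).2)
      else (none, 0)) = (if first.2 ≤ t then (some ((0 : Int), (1 : Int)), first.2) else (none, 0)) := by
    simp [PySem.List.pyGetD_zero_cons]
  simp only [bestSpan, outerB, stepB]
  rw [hpre, hinit]
theorem fold_rel (first : String × Int) (tl : List (String × Int)) (t : Int)
    (a : List (String × Int) × Int) (b : Option (Int × Int) × Int)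
    (h : RelBC (first :: tl) a b) :
    RelBC (first :: tl) (outerA (first :: tl) t a) (outerB (first :: tl) t b) := by
  set L := first :: tl with hL
  have hr1 : PySem.List.pyRange 1 ((L.length : Int) + 1) 1
      = (List.range L.length).map (fun k => (1 : Int) + ↑k) := by
    rw [PySem.List.pyRange_one]
    have e : ((L.length : Int) + 1 - 1).toNat = L.length := by omega
    rw [e]
  have hr0 : PySem.List.pyRange 0 (L.length : Int) 1
      = (List.range L.length).map (fun k => (0 : Int) + ↑k) := by
    rw [PySem.List.pyRange_one]
    have e : ((L.length : Int) - 0).toNat = L.length := by omega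
    rw [e]
  unfold outerA outerB
  rw [hr1, hr0, List.foldl_map, List.foldl_map]
  refine foldl_rel (RelBC L) _ _ (List.range L.length) ?_ a b h
  intro k hk stA stB hR
  have hk' : k < L.length := List.mem_range.mp hk
  have e1 : (1 : Int) + (k : Int) + 1 = (k : Int) + 2 := by ring
  have e2 : (0 : Int) + (k : Int) + 2 = (k : Int) + 2 := by ring
  rw [e1, e2]
  refine foldl_rel (RelBC L) _ _ _ ?_ stA stB hR
  intro j hj sA sB hR'
  rw [PySem.List.mem_pyRange_one] at hj
  have e3 : (1 : Int) + (k : Int) - 1 = (k : Int) := by ring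
  have e4 : (0 : Int) + (k : Int) = (k : Int) := by ring
  simp only [stepA, stepB, e3, e4]
  have h0k : (0 : Int) ≤ (k : Int) := by positivity
  have hkj : (k : Int) ≤ j := by omega
  have hjn : j ≤ (L.length : Int) := by omega
  rw [slice_sum L (k : Int) j h0k hkj hjn, pre_get L j (by omega) hjn,
      pre_get L (k : Int) h0k (by exact_mod_cast Int.ofNat_le.mpr (le_of_lt hk'))]
  obtain ⟨hsp, hval, hok⟩ := hR'
  rw [hval]
  by_cases hc : sumSz (L.take j.toNat) - sumSz (L.take (k : Int).toNat) ≤ t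
      ∧ sB.2 < sumSz (L.take j.toNat) - sumSz (L.take (k : Int).toNat)
  · rw [if_pos hc, if_pos hc]
    exact ⟨rfl, rfl, h0k, by omega, hjn⟩
  · rw [if_neg hc, if_neg hc]
    exact ⟨hsp, hval, hok⟩
theorem init_rel (first : String × Int) (tl : List (String × Int)) (t : Int) :
    RelBC (first :: tl) (if first.2 ≤ t then ([first], first.2) else ([], 0))
      (if first.2 ≤ t then (some (0, 1), first.2) else (none, 0)) := by
  by_cases hc : first.2 ≤ t
  · rw [if_pos hc, if_pos hc]
    refine ⟨?_, rfl, by norm_num, by norm_num, by simp only [List.length_cons]; push_cast; omega⟩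
    show [first] = PySem.List.slice (first :: tl) (some 0) (some 1)
    rw [PySem.List.slice_toNat _ (by norm_num) (by norm_num)]
    simp
  · rw [if_neg hc, if_neg hc]
    exact ⟨rfl, rfl, trivial⟩

theorem best_eq (l : List (String × Int)) (t : Int) :
    find_best_combination l t = spanTo l (bestSpan l t) ∧ spanOK (l.length : Int) (bestSpan l t) := by
  cases l with
  | nil =>
    have h1 : bestSpan [] t = none := by
      simp [bestSpan, PySem.List.pyRange_one_eq_nil]
    rw [h1]
    exact ⟨rfl, trivial⟩
  | cons first tl =>
    have hmain := fold_rel first tl t _ _ (init_rel first tl t)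
    rw [hA_unfold, hB_unfold]
    by_cases hone : (first :: tl).length = 1 ∧ first.2 ≤ t
    · rw [if_pos hone]
      have htl : tl = [] := by
        have h := hone.1; simp at h; exact h
      subst htl
      have hB1 : outerB [first] t (if first.2 ≤ t then (some (0, 1), first.2) else (none, 0))
          = (some (0, 1), first.2) := by
        rw [if_pos hone.2]
        unfold outerB
        have hl1 : ((([first] : List (String × Int)).length : Nat) : Int) = 1 := by simp
        rw [hl1]
        have hr : PySem.List.pyRange 0 (1 : Int) 1 = [0] := by decide
        have hr2 : PySem.List.pyRange ((0 : Int) + 2) ((1 : Int) + 1) 1 = [] := by decide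
        rw [hr, List.foldl_cons, hr2, List.foldl_nil, List.foldl_nil]
      rw [hB1]
      constructor
      · show [first] = PySem.List.slice [first] (some 0) (some 1)
        rw [PySem.List.slice_toNat _ (by norm_num) (by norm_num)]
        simp
      · simp [spanOK]
    · rw [if_neg hone]
      exact ⟨hmain.1, hmain.2.2⟩
theorem loop_eq : ∀ (fuel : Nat) (parts : List (List (String × Int)))
    (rest : List (String × Int)) (ps : Int), rest.Nodup →
    groupLoopA fuel parts rest ps = groupLoopB fuel parts rest ps := by
  intro fuel
  induction fuel with
  | zero => intro parts rest ps _; rfl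
  | succ fuel ih =>
    intro parts rest ps hnd
    simp only [groupLoopA, groupLoopB]
    by_cases hre : rest.isEmpty
    · rw [if_pos hre, if_pos hre]
    · rw [if_neg hre, if_neg hre]
      obtain ⟨hfb, hok⟩ := best_eq rest ps
      cases hsp : bestSpan rest ps with
      | none =>
        rw [hsp] at hfb
        rw [hfb]
        rfl
      | some ij =>
        obtain ⟨i, j⟩ := ij
        rw [hsp] at hfb hok
        obtain ⟨h0, hij, hjn⟩ := hok
        have hslice : PySem.List.slice rest (some i) (some j)
            = List.take (j.toNat - i.toNat) (rest.drop i.toNat) :=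
          PySem.List.slice_toNat rest h0 (by omega)
        have hne : (spanTo rest (some (i, j))).isEmpty = false := by
          show (PySem.List.slice rest (some i) (some j)).isEmpty = false
          rw [hslice, List.isEmpty_eq_false_iff, ← List.length_pos_iff,
              List.length_take, List.length_drop]
          omega
        rw [hfb, hne]
        simp only [Bool.false_eq_true, if_false]
        have hrm : (spanTo rest (some (i, j))).foldl pvRemove rest
            = PySem.List.slice rest none (some i) ++ PySem.List.slice rest (some j) none :=
          remove_slice rest i j hnd h0 hij hjn
        rw [hrm]
        have hnd' : (PySem.List.slice rest none (some i) ++ PySem.List.slice rest (some j) none).Nodup := by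
          rw [PySem.List.slice_to rest h0, PySem.List.slice_from rest (by omega)]
          have hsub : (rest.take i.toNat ++ rest.drop j.toNat).Sublist rest := by
            have h1 : List.Sublist (rest.drop j.toNat) (rest.drop i.toNat) := by
              have e : rest.drop j.toNat = List.drop (j.toNat - i.toNat) (rest.drop i.toNat) := by
                rw [List.drop_drop]; congr 1; omega
              rw [e]
              exact List.drop_sublist _ _
            have h2 : List.Sublist (rest.take i.toNat ++ rest.drop j.toNat)
                (rest.take i.toNat ++ rest.drop i.toNat) := List.Sublist.append_left h1 _
            rw [List.take_append_drop] at h2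
            exact h2
          exact hnd.sublist hsub
        exact ih _ _ ps hnd'
theorem main_eq (items : List (String × Int)) (ps : Int) (hPre : (items.map Prod.fst).Nodup) :
    group_by_part_size items ps = group_by_part_size_alt items ps := by
  have hnd : (PySem.List.sorted items (fun x => x.2) true).Nodup :=
    ((PySem.List.sorted_perm items (fun x => x.2) true).nodup_iff).mpr (List.Nodup.of_map Prod.fst hPre)
  simp only [group_by_part_size, group_by_part_size_alt]
  have hsplit := PySem.List.foldl_prod_mk (fun (acc : List (List (String × Int))) (it : String × Int) => acc ++ [[it]])
      pvRemove ((PySem.List.sorted items (fun x => x.2) true).filter (fun it => decide (ps < it.2)))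
      [] (PySem.List.sorted items (fun x => x.2) true)
  simp only [hsplit, PySem.List.foldl_append_singleton_eq_map]
  have hbool : ∀ a : String × Int, (!decide (ps < a.2)) = decide (a.2 ≤ ps) := by
    intro a
    by_cases h : ps < a.2
    · simp [h, not_le.mpr h]
    · simp [h, not_lt.mp h]
  have hfil : ((PySem.List.sorted items (fun x => x.2) true).filter
        (fun it => decide (ps < it.2))).foldl pvRemove (PySem.List.sorted items (fun x => x.2) true)
      = (PySem.List.sorted items (fun x => x.2) true).filter (fun it => decide (it.2 ≤ ps)) := by
    rw [remove_filter _ _ hnd]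
    exact List.filter_congr (fun a _ => hbool a)
  rw [hfil]
  simp only [List.nil_append]
  exact loop_eq _ _ _ ps (hnd.filter _)

-- ===== VERDICT (by name: the statement is the Claim_ definition above) =====
theorem group_by_part_size_spec : Claim_equal_group_by_part_size := by
  intro items ps _ hPre
  unfold Spec_group_by_part_size
  exact main_eq items ps hPre
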